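-- pv_equiv track=rewrite | github.com/true-grue/Brus-16 | brus16_sst.py | make_c_fields
-- ===== SOURCE A (Python) =====
-- def make_c_fields(fmt):
--     lines = set()
--     for fields in fmt:
--         pos = 0
--         for name, size in reversed(fields):
--             lines.add(f'#define {name}_POS {pos}')
--             lines.add(f'#define {name}_SIZE {size}')
--             pos += size
--     return list(sorted(lines))
-- ===== SOURCE B (Python) =====
-- def make_c_fields(fmt):
--     lines = set()
--     for fields in fmt:
--         rev = list(reversed(fields))
--         # pass 1: exclusive prefix sums of the sizes = the field positions
--         positions = [0]
--         for _, size in rev: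
--             positions.append(positions[-1] + size)
--         # pass 2: emit the two macro lines per field from the offset table
--         for (name, size), pos in zip(rev, positions):
--             lines.add(f'#define {name}_POS {pos}')
--             lines.add(f'#define {name}_SIZE {size}')
--     return sorted(lines)
-- ===== Notes on version B (the rewrite author's own statement) =====
-- stated objective: alternative
-- what changed: Replaces the single position-threading loop by two separate passes per group: first build an exclusive-prefix-sum offset table of the reversed sizes, then zip each reversed field with its precomputed position to emit the macro lines.
import Mathlib
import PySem

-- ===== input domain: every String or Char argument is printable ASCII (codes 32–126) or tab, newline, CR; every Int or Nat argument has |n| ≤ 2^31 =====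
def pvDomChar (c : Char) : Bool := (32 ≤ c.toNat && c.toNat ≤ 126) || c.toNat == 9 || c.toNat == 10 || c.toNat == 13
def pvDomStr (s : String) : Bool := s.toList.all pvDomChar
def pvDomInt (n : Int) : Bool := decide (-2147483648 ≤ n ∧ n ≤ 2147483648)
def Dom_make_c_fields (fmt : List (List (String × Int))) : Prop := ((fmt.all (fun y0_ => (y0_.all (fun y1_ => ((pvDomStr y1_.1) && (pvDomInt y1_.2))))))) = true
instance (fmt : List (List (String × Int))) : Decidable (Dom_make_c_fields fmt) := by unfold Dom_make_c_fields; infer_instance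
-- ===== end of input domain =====

-- B replaces A's position-threading inner loop by two separate passes per group
-- (an exclusive-prefix-sum offset table, then a zip emitting the macro lines): an alternative decomposition.


-- ===== PORT A =====
def make_c_fields (fmt : List (List (String × Int))) : List String :=
  let lines : PySem.Set String :=
    fmt.foldl (fun lines fields =>
      (fields.reverse.foldl (fun (st : PySem.Set String × Int) nv =>
        let l := PySem.Set.add st.1 ("#define " ++ nv.1 ++ "_POS " ++ PySem.Int.toStr st.2)
        let l := PySem.Set.add l ("#define " ++ nv.1 ++ "_SIZE " ++ PySem.Int.toStr nv.2)
        (l, st.2 + nv.2)) (lines, 0)).1) PySem.Set.empty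
  PySem.List.sorted lines (fun x => x) false

-- ===== PORT B =====
def make_c_fields_alt (fmt : List (List (String × Int))) : List String :=
  let lines : PySem.Set String :=
    fmt.foldl (fun lines fields =>
      let rev := fields.reverse
      -- pass 1: positions.append(positions[-1] + size); positions[-1] = getLastD (list is never empty)
      let positions := rev.foldl (fun (ps : List Int) nv => ps ++ [ps.getLastD 0 + nv.2]) [0]
      -- pass 2: emit from the zip of the reversed fields with the offset table
      (rev.zip positions).foldl (fun l x =>
        PySem.Set.add
          (PySem.Set.add l ("#define " ++ x.1.1 ++ "_POS " ++ PySem.Int.toStr x.2))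
          ("#define " ++ x.1.1 ++ "_SIZE " ++ PySem.Int.toStr x.1.2)) lines) PySem.Set.empty
  PySem.List.sorted lines (fun x => x) false

-- ===== PRECONDITION & SPEC =====
def Spec_make_c_fields (fmt : List (List (String × Int))) (out : List String) : Prop := out = make_c_fields_alt fmt
instance (fmt : List (List (String × Int))) (out : List String) : Decidable (Spec_make_c_fields fmt out) := by unfold Spec_make_c_fields; infer_instance

-- ===== CLAIM (what is proved, stated in full; the proofs are below) =====
def Claim_equal_make_c_fields : Prop := ∀ (fmt : List (List (String × Int))), Dom_make_c_fields fmt → Spec_make_c_fields fmt (make_c_fields fmt)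

-- ===== LEMMAS AND PROOFS =====

/-- Exclusive prefix sums of the sizes, starting at `p` (specification of B's pass 1). -/
def pvScan (p : Int) : List (String × Int) → List Int
  | [] => [p]
  | nv :: t => p :: pvScan (p + nv.2) t

theorem pvScan_build (l : List (String × Int)) : ∀ (acc : List Int) (p : Int),
    l.foldl (fun (ps : List Int) nv => ps ++ [ps.getLastD 0 + nv.2]) (acc ++ [p])
      = acc ++ pvScan p l := by
  induction l with
  | nil => intro acc p; simp [pvScan]
  | cons nv t ih =>
    intro acc p
    have h : (acc ++ [p]) ++ [(acc ++ [p]).getLastD 0 + nv.2] = (acc ++ [p]) ++ [p + nv.2] := by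
      simp
    simp only [List.foldl_cons, h]
    rw [List.append_assoc] at *
    simpa [pvScan] using ih (acc ++ [p]) (p + nv.2)

theorem pvInner (l : List (String × Int)) : ∀ (s : PySem.Set String) (p : Int),
    (l.zip (pvScan p l)).foldl (fun (acc : PySem.Set String) x =>
        PySem.Set.add
          (PySem.Set.add acc ("#define " ++ x.1.1 ++ "_POS " ++ PySem.Int.toStr x.2))
          ("#define " ++ x.1.1 ++ "_SIZE " ++ PySem.Int.toStr x.1.2)) s
      = (l.foldl (fun (st : PySem.Set String × Int) nv =>
          let a := PySem.Set.add st.1 ("#define " ++ nv.1 ++ "_POS " ++ PySem.Int.toStr st.2)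
          let a := PySem.Set.add a ("#define " ++ nv.1 ++ "_SIZE " ++ PySem.Int.toStr nv.2)
          (a, st.2 + nv.2)) (s, p)).1 := by
  induction l with
  | nil => intro s p; simp [pvScan]
  | cons nv t ih => intro s p; simp only [pvScan, List.zip_cons_cons, List.foldl_cons]; exact ih _ _

theorem make_c_fields_spec : Claim_equal_make_c_fields := by
  intro fmt _
  unfold Spec_make_c_fields make_c_fields make_c_fields_alt
  exact congrArg (fun l => PySem.List.sorted l (fun x => x) false) (by
    apply List.foldl_ext
    intro lines fields _
    have hb := pvScan_build fields.reverse [] 0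
    simp only [List.nil_append] at hb
    simp only [hb]
    exact (pvInner fields.reverse lines 0).symm)
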